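-- pv_equiv track=rewrite | github.com/wjmmmwjj/auto_piano | playback/project_score_tools.py | normalize_arp_offsets
-- ===== SOURCE A (Python) =====
-- from typing import Iterable
--
-- MAX_NOTE_MS = 30000
--
-- ARP_OFFSET_STEP_MS = 5
--
-- def normalize_arp_offsets(offsets: Iterable[int], note_count: int) -> list[int]:
--     cleaned = [max(0, int(offset)) for offset in offsets]
--     if note_count <= 0:
--         return []
--     if not cleaned:
--         return [0]
--
--     normalized: list[int] = []
--     last_offset = 0
--     for index, offset in enumerate(cleaned[:note_count]):
--         current = int(round(offset / ARP_OFFSET_STEP_MS) * ARP_OFFSET_STEP_MS)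
--         current = max(0, min(MAX_NOTE_MS, current))
--         if index == 0:
--             current = 0
--         else:
--             current = max(last_offset, current)
--         normalized.append(current)
--         last_offset = current
--
--     while len(normalized) < note_count:
--         normalized.append(last_offset)
--
--     return normalized
-- ===== SOURCE B (Python) =====
-- MAX_NOTE_MS = 30000
--
-- ARP_OFFSET_STEP_MS = 5
--
-- def normalize_arp_offsets(offsets, note_count):
--     if note_count <= 0:
--         return []
--     vals = []
--     for o in offsets:
--         vals.append(max(0, int(o)))
--     if not vals:
--         return [0]
--     n = min(note_count, len(vals))
--     # Records: the positions where the monotone output strictly increases,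
--     # as a run-length encoding. Index 0 is pinned to value 0; a later index i
--     # becomes a record only if its rounded/clamped candidate beats the last
--     # record's value. Rounding uses half-up integer division (v+2)//5, exact
--     # here because v >= 0 and v/5 never lands on a half-integer tie.
--     step = ARP_OFFSET_STEP_MS
--     records = [(0, 0)]
--     for i, v in enumerate(vals[1:n], start=1):
--         c = max(0, min(MAX_NOTE_MS, step * ((v + 2) // step)))
--         if c > records[-1][1]:
--             records.append((i, c))
--     # Expand the run-length encoding: each record's value fills up to the next
--     # record's index; the last record fills all the way to note_count.
--     out = []
--     for k, (i, v) in enumerate(records):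
--         end = records[k + 1][0] if k + 1 < len(records) else note_count
--         out.extend([v] * (end - i))
--     return out
-- ===== Notes on version B (the rewrite author's own statement) =====
-- stated objective: alternative
-- what changed: A's fused per-element loop (running max appended for every index, then a while-loop pad) is replaced by a run-length-encoding algorithm: B collects only the record points (index,value) where the monotone output strictly increases, using half-up integer division (v+2)//5 instead of float round, then expands those runs to the output, the last run absorbing the padding.
import Mathlib
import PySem

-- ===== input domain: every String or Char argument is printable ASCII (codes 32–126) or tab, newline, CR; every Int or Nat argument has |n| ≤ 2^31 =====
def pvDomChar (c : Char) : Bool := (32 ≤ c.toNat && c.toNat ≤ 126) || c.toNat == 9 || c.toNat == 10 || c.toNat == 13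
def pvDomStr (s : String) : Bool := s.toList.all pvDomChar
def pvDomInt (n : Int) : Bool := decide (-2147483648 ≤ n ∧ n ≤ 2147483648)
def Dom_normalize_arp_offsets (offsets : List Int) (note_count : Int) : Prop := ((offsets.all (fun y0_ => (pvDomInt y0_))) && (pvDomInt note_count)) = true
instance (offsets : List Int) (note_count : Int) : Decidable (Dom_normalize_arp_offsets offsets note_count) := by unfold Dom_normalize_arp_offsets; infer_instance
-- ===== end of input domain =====

-- B replaces A's fused per-element running-max loop by a run-length-encoding algorithm
-- (collect only the record points where the output strictly increases, then expand the
-- runs, the last run absorbing the padding): objective = alternative.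

-- ===== PORT A =====
-- the for-loop of A: state = (list built so far, last_offset), with the running index.
-- `int(round(offset / 5) * 5)` is ported as `5 * ((offset + 2) // 5)`: exact here because
-- offset ≥ 0 (element of `cleaned`), offset/5 never has fractional part .5 (so no banker's
-- tie), and on |offset| ≤ 2^31 the float quotient's error cannot cross a rounding boundary.
def pvLoopA : List Int → Nat → Int → List Int × Int
  | [], _, last => ([], last)
  | o :: rest, idx, last =>
    let c0 : Int := 5 * PySem.Int.floordiv (o + 2) 5
    let c1 : Int := max 0 (min 30000 c0)
    let current : Int := if idx == 0 then (0 : Int) else max last c1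
    let r := pvLoopA rest (idx + 1) current
    (current :: r.1, r.2)

def normalize_arp_offsets (offsets : List Int) (note_count : Int) : List Int :=
  let cleaned := offsets.map (fun o => max 0 o)
  if note_count ≤ 0 then []
  else if cleaned = [] then [0]
  else
    let r := pvLoopA (cleaned.take note_count.toNat) 0 0
    r.1 ++ List.replicate (note_count.toNat - r.1.length) r.2

-- ===== PORT B =====
-- one candidate: round to the 5 ms grid (half-up integer division, exact as in A's port
-- comment above) and clamp to [0, 30000]
def pvCand (v : Int) : Int := max 0 (min 30000 (5 * PySem.Int.floordiv (v + 2) 5))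

-- B's record loop over vals[1:n] with running index i and the last record's value
-- (records[-1][1]); a record (i, c) is kept only when c strictly beats it.
def pvRecs : List Int → Nat → Int → List (Nat × Int)
  | [], _, _ => []
  | v :: t, i, lastVal =>
    let c := pvCand v
    if lastVal < c then (i, c) :: pvRecs t (i + 1) c
    else pvRecs t (i + 1) lastVal

-- B's expansion loop: each record's value fills up to the next record's index
-- (records[k+1][0]); the last record fills to note_count (= total).
def pvExpand : List (Nat × Int) → Nat → List Int
  | [], _ => []
  | (i, v) :: rest, total =>
    let endIdx := match rest with
      | [] => total
      | (j, _) :: _ => j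
    List.replicate (endIdx - i) v ++ pvExpand rest total

def normalize_arp_offsets_alt (offsets : List Int) (note_count : Int) : List Int :=
  if note_count ≤ 0 then []
  else
    let vals := offsets.map (fun o => max 0 o)
    if vals = [] then [0]
    else
      let recs := (0, (0 : Int)) :: pvRecs ((vals.take note_count.toNat).drop 1) 1 0
      pvExpand recs note_count.toNat

-- ===== PRECONDITION & SPEC =====
def Spec_normalize_arp_offsets (offsets : List Int) (note_count : Int) (out : List Int) : Prop := out = normalize_arp_offsets_alt offsets note_count
instance (offsets : List Int) (note_count : Int) (out : List Int) : Decidable (Spec_normalize_arp_offsets offsets note_count out) := by unfold Spec_normalize_arp_offsets; infer_instance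

-- ===== CLAIM (what is proved, stated in full; the proofs are below) =====
def Claim_equal_normalize_arp_offsets : Prop := ∀ (offsets : List Int) (note_count : Int), Dom_normalize_arp_offsets offsets note_count → Spec_normalize_arp_offsets offsets note_count (normalize_arp_offsets offsets note_count)

-- ===== LEMMAS AND PROOFS =====

-- A's fused loop past index 0 as a reference "prefix maximum" scan
def pvPrefMax : List Int → Int → List Int × Int
  | [], m => ([], m)
  | c :: t, m =>
    let m' := max m c
    let r := pvPrefMax t m'
    (m' :: r.1, r.2)

theorem pvLoopA_eq_prefMax (t : List Int) : ∀ (idx : Nat) (last : Int),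
    pvLoopA t (idx + 1) last = pvPrefMax (t.map pvCand) last := by
  induction t with
  | nil => intro idx last; rfl
  | cons o rest ih =>
    intro idx last
    simp [pvLoopA, pvPrefMax, pvCand, ih (idx + 1)]

-- expanding the records of t starting at index j, headed by a record (i, m) with i < j,
-- yields m up to j, then the prefix-maximum of t's candidates, then padding to total
theorem pvPrefMax_length (l : List Int) : ∀ m : Int, (pvPrefMax l m).1.length = l.length := by
  induction l with
  | nil => intro m; rfl
  | cons c t ih => intro m; simp [pvPrefMax, ih]

theorem pvExpand_cons (i : Nat) (m : Int) (j : Nat) (c : Int) (rest : List (Nat × Int))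
    (total : Nat) :
    pvExpand ((i, m) :: (j, c) :: rest) total
      = List.replicate (j - i) m ++ pvExpand ((j, c) :: rest) total := rfl

theorem pvExpand_recs (t : List Int) : ∀ (i j : Nat) (m : Int) (total : Nat),
    i < j → j + t.length ≤ total →
    pvExpand ((i, m) :: pvRecs t j m) total
      = List.replicate (j - i) m ++ (pvPrefMax (t.map pvCand) m).1
          ++ List.replicate (total - (j + t.length)) (pvPrefMax (t.map pvCand) m).2 := by
  induction t with
  | nil =>
    intro i j m total hij hle
    simp only [pvRecs, pvExpand, List.map, pvPrefMax, List.length_nil, List.append_nil]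
    rw [← List.replicate_add]
    congr 1
    omega
  | cons v t ih =>
    intro i j m total hij hle
    simp only [List.length_cons] at hle
    by_cases h : m < pvCand v
    · have hmax : max m (pvCand v) = pvCand v := by omega
      simp only [pvRecs, h, if_true]
      rw [pvExpand_cons, ih j (j + 1) (pvCand v) total (by omega) (by omega)]
      simp only [List.map, pvPrefMax, hmax]
      simp only [Nat.add_sub_cancel_left, List.replicate_one]
      have : j + 1 + t.length = j + (t.length + 1) := by omega
      rw [this]
      simp [List.append_assoc]
    · have hmax : max m (pvCand v) = m := by omega
      simp only [pvRecs, h, if_false]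
      rw [ih i (j + 1) m total (by omega) (by omega)]
      simp only [List.map, pvPrefMax, hmax]
      have h1 : j + 1 - i = (j - i) + 1 := by omega
      have h2 : j + 1 + t.length = j + (t.length + 1) := by omega
      rw [h1, h2, List.replicate_succ', List.append_assoc]
      simp

-- ===== VERDICT (by name: the statement is the Claim_ definition above) =====
theorem normalize_arp_offsets_spec : Claim_equal_normalize_arp_offsets := by
  intro offsets note_count _
  unfold Spec_normalize_arp_offsets normalize_arp_offsets normalize_arp_offsets_alt
  by_cases h1 : note_count ≤ 0
  · simp [h1]
  · by_cases h2 : offsets.map (fun o => max 0 o) = []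
    · simp [h1, h2]
    · have hnc : 1 ≤ note_count.toNat := by omega
      have hne : (offsets.map (fun o => max 0 o)).take note_count.toNat ≠ [] := by
        rw [Ne, List.take_eq_nil_iff]
        push Not
        exact ⟨by omega, h2⟩
      obtain ⟨h, t, hl⟩ := List.exists_cons_of_ne_nil hne
      have hlen : 1 + t.length ≤ note_count.toNat := by
        have := List.length_take_le note_count.toNat (offsets.map (fun o => max 0 o))
        rw [hl] at this
        simp at this
        omega
      have hdrop : ((offsets.map (fun o => max 0 o)).take note_count.toNat).drop 1 = t := by
        rw [hl]; rfl
      simp only [h1, h2, if_false, hl, List.drop_succ_cons, List.drop_zero]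
      rw [pvExpand_recs t 0 1 0 note_count.toNat (by omega) (by omega)]
      simp only [pvLoopA, pvLoopA_eq_prefMax t 0]
      simp [pvPrefMax_length, Nat.add_comm]
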